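-- pv_equiv track=rewrite | github.com/AlekseyZhadko/git_2_seminar_2 | Example_5_1.py | polynomial_znak
-- ===== SOURCE A (Python) =====
-- def polynomial_znak(poly_1):
--     count = 0
--     for i in poly_1:
--         if '-' in i:
--             count+=1
--             polyif = i.split('-')
--             if len(polyif)>=2 and polyif[0] !='':
--                 for j in range(1,len(polyif)):
--                     polyif[j]='-'+polyif[j]
--                     poly_1.append(polyif[j])
--                 if polyif[0] !='':
--                     poly_1.append(polyif[0])
--                 poly_1.pop(poly_1.index(i))
--                 return polynomial_znak(poly_1)
--     if count == 0:
--         return poly_1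
-- ===== SOURCE B (Python) =====
-- def polynomial_znak(poly_1):
--     # Return-value equivalent to A: A returns the list unchanged iff no term
--     # contains '-'; otherwise every rewriting step appends a '-'-prefixed piece
--     # that can never be eliminated, so A's final scan always finds a '-' and it
--     # returns None.  (A mutates poly_1 in place in that case; B does not --
--     # equivalence here is about the return value only.)
--     if any('-' in term for term in poly_1):
--         return None
--     return poly_1
-- ===== Notes on version B (the rewrite author's own statement) =====
-- stated objective: simpler
-- what changed: Replaced the rescan-split-append-pop tail recursion by a single membership scan, using the invariant that any '-' anywhere forces A to end in None and otherwise A returns the list untouched.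
import Mathlib
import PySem

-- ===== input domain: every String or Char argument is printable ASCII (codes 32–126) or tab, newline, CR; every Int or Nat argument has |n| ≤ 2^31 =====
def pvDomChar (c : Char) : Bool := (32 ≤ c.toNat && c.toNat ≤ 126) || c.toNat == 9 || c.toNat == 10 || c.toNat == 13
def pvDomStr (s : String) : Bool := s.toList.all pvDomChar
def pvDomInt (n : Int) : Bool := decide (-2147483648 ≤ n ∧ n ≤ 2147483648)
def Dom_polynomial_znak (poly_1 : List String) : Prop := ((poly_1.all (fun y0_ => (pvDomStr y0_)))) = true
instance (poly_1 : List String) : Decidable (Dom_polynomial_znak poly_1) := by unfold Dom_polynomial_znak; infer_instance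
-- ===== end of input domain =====

-- B replaces A's rescan/split/append/pop recursion by one membership scan (return-value
-- equivalence only: A mutates its argument in place when a '-' is present, B does not).

-- ===== PORT A =====
-- the 'for i in poly_1' scan: returns the first element whose split is processable
-- (Sum.inl i), or the final value of 'count' when the loop completes (Sum.inr count)
def pzFind (rest : List String) (count : Nat) : String ⊕ Nat :=
  match rest with
  | [] => Sum.inr count
  | i :: tl =>
    if PySem.Str.isIn "-" i then
      let polyif := (PySem.Str.split? i "-").getD []   -- i.split('-'); sep ≠ "" so split? is some
      if polyif.length ≥ 2 ∧ polyif.headD "" ≠ "" then Sum.inl i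
      else pzFind tl (count + 1)
    else pzFind tl count

-- one inner step: polyif[j] = '-'+polyif[j]; poly_1.append(polyif[j])
def pzStep (st : List String × List String) (j : Int) : List String × List String :=
  let v := "-" ++ PySem.List.pyGetD st.1 j ""
  (PySem.List.pySetD st.1 j v, st.2 ++ [v])

-- the tail recursion of A; fuel only makes it total (each call removes one processable
-- element and adds none, so length+1 calls suffice; a 'none' on exhausted fuel agrees
-- with A, which returns None whenever any rewriting step has happened)
def pzGo (fuel : Nat) (poly : List String) : Option (List String) :=
  match fuel with
  | 0 => none
  | Nat.succ fuel =>
    match pzFind poly 0 with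
    | Sum.inr count => if count = 0 then some poly else none   -- loop finished
    | Sum.inl i =>
      let polyif := (PySem.Str.split? i "-").getD []
      let st := (PySem.List.pyRange 1 (polyif.length : Int) 1).foldl pzStep (polyif, poly)
      let poly := if st.1.headD "" ≠ "" then st.2 ++ [st.1.headD ""] else st.2
      match PySem.List.index? poly i with
      | none => none                                   -- ValueError (unreachable: i ∈ poly)
      | some k =>
        match PySem.List.pop? poly (k : Int) with
        | none => none
        | some (_, poly') => pzGo fuel poly'           -- return polynomial_znak(poly_1)

def polynomial_znak (poly_1 : List String) : Option (List String) :=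
  pzGo (poly_1.length + 1) poly_1

-- ===== PORT B =====
def polynomial_znak_alt (poly_1 : List String) : Option (List String) :=
  if poly_1.any (fun term => PySem.Str.isIn "-" term) then none else some poly_1

-- ===== PRECONDITION & SPEC =====
def Spec_polynomial_znak (poly_1 : List String) (out : Option (List String)) : Prop := out = polynomial_znak_alt poly_1
instance (poly_1 : List String) (out : Option (List String)) : Decidable (Spec_polynomial_znak poly_1 out) := by unfold Spec_polynomial_znak; infer_instance

-- ===== CLAIM (what is proved, stated in full; the proofs are below) =====
def Claim_equal_polynomial_znak : Prop := ∀ (poly_1 : List String), Dom_polynomial_znak poly_1 → Spec_polynomial_znak poly_1 (polynomial_znak poly_1)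

-- ===== LEMMAS AND PROOFS =====

-- abbreviation used only by the proofs
def pzHasD (s : String) : Bool := PySem.Str.isIn "-" s

theorem pzFind_clean (rest : List String) (count : Nat)
    (h : ∀ s ∈ rest, pzHasD s = false) : pzFind rest count = Sum.inr count := by
  induction rest with
  | nil => rfl
  | cons i tl ih =>
    have hi : pzHasD i = false := h i (List.mem_cons_self ..)
    simp [pzFind, pzHasD] at hi ⊢
    simp [hi]
    exact ih (fun s hs => h s (List.mem_cons_of_mem _ hs))

theorem pzFind_inr (rest : List String) (count c' : Nat)
    (h : pzFind rest count = Sum.inr c') (hd : ∃ s ∈ rest, pzHasD s = true) :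
    count < c' := by
  induction rest generalizing count with
  | nil => simp at hd
  | cons i tl ih =>
    by_cases hi : PySem.Str.isIn "-" i
    · simp only [pzFind, hi, if_true] at h
      split at h
      · exact absurd h (by simp)
      · by_cases hdt : ∃ s ∈ tl, pzHasD s = true
        · have := ih _ h hdt
          omega
        · have hcl : pzFind tl (count + 1) = Sum.inr (count + 1) := by
            apply pzFind_clean
            intro s hs
            by_contra hc
            exact hdt ⟨s, hs, by simpa using hc⟩
          rw [hcl] at h
          cases h
          omega
    · simp only [pzFind, hi] at h
      rcases hd with ⟨s, hs, hsd⟩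
      rcases List.mem_cons.mp hs with rfl | hs'
      · exact absurd hsd (by simpa [pzHasD] using hi)
      · exact ih _ h ⟨s, hs', hsd⟩

theorem pzFind_inl (rest : List String) (count : Nat) (i : String)
    (h : pzFind rest count = Sum.inl i) :
    i ∈ rest ∧ pzHasD i = true ∧ ((PySem.Str.split? i "-").getD []).length ≥ 2 := by
  induction rest generalizing count with
  | nil => simp [pzFind] at h
  | cons x tl ih =>
    by_cases hx : PySem.Str.isIn "-" x
    · simp only [pzFind, hx, if_true] at h
      split at h
      · rename_i hcond
        cases h
        exact ⟨List.mem_cons_self .., by simpa [pzHasD] using hx, hcond.1⟩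
      · rcases ih _ h with ⟨h1, h2, h3⟩
        exact ⟨List.mem_cons_of_mem _ h1, h2, h3⟩
    · simp only [pzFind, hx] at h
      rcases ih _ h with ⟨h1, h2, h3⟩
      exact ⟨List.mem_cons_of_mem _ h1, h2, h3⟩

theorem pzHasD_dash_append (x : String) : pzHasD ("-" ++ x) = true := by
  have : ("-" : String).toList <:+: ("-" ++ x).toList := by
    simp
    exact ⟨[], x.toList, rfl⟩
  simpa [pzHasD] using (PySem.Str.isIn_iff_infix _ _).mpr this

theorem pzStep_countP_mono (L : List Int) (st : List String × List String) :
    st.2.countP pzHasD ≤ (L.foldl pzStep st).2.countP pzHasD := by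
  induction L generalizing st with
  | nil => simp
  | cons j tl ih =>
    refine le_trans ?_ (ih (pzStep st j))
    simp [pzStep, List.countP_append]

theorem pzStep_countP_lt (j : Int) (L : List Int) (st : List String × List String) :
    st.2.countP pzHasD + 1 ≤ ((j :: L).foldl pzStep st).2.countP pzHasD := by
  have h1 : (pzStep st j).2.countP pzHasD = st.2.countP pzHasD + 1 := by
    simp [pzStep, List.countP_append, pzHasD_dash_append]
  calc st.2.countP pzHasD + 1 = (pzStep st j).2.countP pzHasD := h1.symm
    _ ≤ _ := pzStep_countP_mono L (pzStep st j)

theorem countP_eraseIdx_ge (l : List α) (k : Nat) (p : α → Bool) :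
    l.countP p ≤ (l.eraseIdx k).countP p + 1 := by
  induction l generalizing k with
  | nil => simp
  | cons x tl ih =>
    cases k with
    | zero => simp [List.countP_cons]; split_ifs <;> omega
    | succ k =>
      have := ih k
      simp only [List.eraseIdx_cons_succ, List.countP_cons]
      split_ifs <;> omega

-- main lemma: a list containing a '-' always yields none, for every fuel
theorem pzGo_dirty (fuel : Nat) (poly : List String)
    (hd : ∃ s ∈ poly, pzHasD s = true) : pzGo fuel poly = none := by
  induction fuel generalizing poly with
  | zero => rfl
  | succ fuel ih =>
    rw [pzGo]
    cases hfind : pzFind poly 0 with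
    | inr count =>
      have := pzFind_inr poly 0 count hfind hd
      simp [Nat.pos_iff_ne_zero.mp this]
    | inl i =>
      rcases pzFind_inl poly 0 i hfind with ⟨hmem, hdi, hlen⟩
      simp only
      set polyif := (PySem.Str.split? i "-").getD [] with hpolyif
      set st := (PySem.List.pyRange 1 (polyif.length : Int) 1).foldl pzStep (polyif, poly) with hst
      set poly2 := if st.1.headD "" ≠ "" then st.2 ++ [st.1.headD ""] else st.2 with hpoly2
      cases hidx : PySem.List.index? poly2 i with
      | none => rfl
      | some k =>
        obtain ⟨hk, -, -⟩ := PySem.List.getElem_of_index?_eq_some hidx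
        simp only [PySem.List.pop?_natCast poly2 k hk]
        apply ih
        -- countP of poly ≥ 1, foldl adds ≥ 1, head-append keeps, erase removes ≤ 1
        have hc0 : 1 ≤ poly.countP pzHasD := List.countP_pos_iff.mpr ⟨i, hmem, hdi⟩
        have hrange : ∃ j L, PySem.List.pyRange 1 (polyif.length : Int) 1 = j :: L := by
          have h2 : (1 : Int) < (polyif.length : Int) := by exact_mod_cast hlen
          have hmem1 : (1 : Int) ∈ PySem.List.pyRange 1 (polyif.length : Int) 1 := by
            rw [PySem.List.mem_pyRange_iff_of_pos (by omega)]
            refine ⟨by omega, h2, ⟨0, by ring⟩⟩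
          cases hE : PySem.List.pyRange 1 (polyif.length : Int) 1 with
          | nil => rw [hE] at hmem1; simp at hmem1
          | cons j L => exact ⟨j, L, rfl⟩
        rcases hrange with ⟨j, L, hjL⟩
        have hc2 : poly.countP pzHasD + 1 ≤ st.2.countP pzHasD := by
          rw [hst, hjL]; exact pzStep_countP_lt j L (polyif, poly)
        have hc3 : st.2.countP pzHasD ≤ poly2.countP pzHasD := by
          rw [hpoly2]; split <;> simp [List.countP_append]
        have hc4 : poly2.countP pzHasD ≤ (poly2.eraseIdx k).countP pzHasD + 1 :=
          countP_eraseIdx_ge poly2 k pzHasD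
        have : 0 < (poly2.eraseIdx k).countP pzHasD := by omega
        exact List.countP_pos_iff.mp this

-- ===== VERDICT (by name: the statement is the Claim_ definition above) =====
theorem polynomial_znak_spec : Claim_equal_polynomial_znak := by
  intro poly_1 _
  unfold Spec_polynomial_znak polynomial_znak polynomial_znak_alt
  by_cases hd : ∃ s ∈ poly_1, pzHasD s = true
  · have hany : poly_1.any (fun term => PySem.Str.isIn "-" term) = true := by
      rcases hd with ⟨s, hs, h⟩
      exact List.any_eq_true.mpr ⟨s, hs, by simpa [pzHasD] using h⟩
    rw [pzGo_dirty _ _ hd, hany]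
    simp
  · have hclean : ∀ s ∈ poly_1, pzHasD s = false := by
      intro s hs
      by_contra hc
      exact hd ⟨s, hs, by simpa using hc⟩
    have hany : poly_1.any (fun term => PySem.Str.isIn "-" term) = false := by
      simp only [List.any_eq_false]
      intro s hs
      simpa [pzHasD] using hclean s hs
    rw [hany]
    simp only [pzGo, pzFind_clean poly_1 0 hclean]
    rfl
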